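-- pv_equiv track=rewrite | github.com/Aequivinius/ikean | generate.py | invert_translations
-- ===== SOURCE A (Python) =====
-- def invert_translations(translations):
--     inverted_translations = {}
--     for key, value in translations.items():
--         for lang, text in value.items():
--             if lang not in inverted_translations:
--                 inverted_translations[lang] = {}
--             inverted_translations[lang][key] = text
--     return inverted_translations
-- ===== SOURCE B (Python) =====
-- def invert_translations(translations):
--     # Pass 1: index the languages in first-occurrence order.
--     languages = []
--     for value in translations.values():
--         for lang in value:
--             if lang not in languages:
--                 languages.append(lang)
--     # Pass 2: one shaped pass per language, collecting that language's texts.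
--     inverted_translations = {}
--     for lang in languages:
--         sub = {}
--         for key, value in translations.items():
--             for l, text in value.items():
--                 if l == lang:
--                     sub[key] = text
--         inverted_translations[lang] = sub
--     return inverted_translations
-- ===== Notes on version B (the rewrite author's own statement) =====
-- stated objective: alternative
-- what changed: Replaces A's single incremental pass that grows sub-dicts inside one accumulator by a two-phase plan: first index all languages in first-occurrence order, then build each language's complete sub-dict with its own pass over the translations.
import Mathlib
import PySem

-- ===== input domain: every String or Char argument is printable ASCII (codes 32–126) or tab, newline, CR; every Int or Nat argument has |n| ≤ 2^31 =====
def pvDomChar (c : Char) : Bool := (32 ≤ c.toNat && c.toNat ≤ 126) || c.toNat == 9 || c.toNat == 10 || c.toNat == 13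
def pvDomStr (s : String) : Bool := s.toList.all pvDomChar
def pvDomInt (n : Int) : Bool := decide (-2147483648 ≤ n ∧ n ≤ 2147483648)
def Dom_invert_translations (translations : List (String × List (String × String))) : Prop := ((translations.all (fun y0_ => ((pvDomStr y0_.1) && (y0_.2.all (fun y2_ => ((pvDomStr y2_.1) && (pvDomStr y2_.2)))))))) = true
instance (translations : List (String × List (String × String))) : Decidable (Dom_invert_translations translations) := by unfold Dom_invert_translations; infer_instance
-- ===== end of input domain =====

-- B reorganises A's single incremental pass into 'index the languages first, then one pass per language'; same result, no speed claim.

-- ===== PORT A =====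
-- A: one pass; for each (key, value) and (lang, text): ensure inverted[lang] exists, then inverted[lang][key] = text.
-- 'inverted_translations[lang][key] = text' is ported as Dict.modify; the guard just above guarantees the key is
-- present, so the modify never falls back to its default and no KeyError is reachable (A is total).
def invert_translations (translations : List (String × List (String × String))) : List (String × List (String × String)) :=
  let inv : PySem.Dict String (PySem.Dict String String) :=
    translations.foldl (fun inv kv =>
      kv.2.foldl (fun inv lt =>
        let inv := if inv.contains lt.1 then inv else inv.insert lt.1 PySem.Dict.empty
        inv.modify lt.1 PySem.Dict.empty (fun sub => sub.insert kv.1 lt.2)) inv)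
      PySem.Dict.empty
  inv.items.map (fun p => (p.1, p.2.items))

-- ===== PORT B =====
-- B: pass 1 collects the languages ('languages' is an ordered set, first-occurrence order);
--    pass 2 builds each language's sub-dict by its own pass over translations.
def invert_translations_alt (translations : List (String × List (String × String))) : List (String × List (String × String)) :=
  let languages : PySem.Set String :=
    translations.foldl (fun s kv => kv.2.foldl (fun s lt => PySem.Set.add s lt.1) s) []
  let inv : PySem.Dict String (PySem.Dict String String) :=
    languages.foldl (fun inv lang =>
      let sub : PySem.Dict String String :=
        translations.foldl (fun sub kv =>
          kv.2.foldl (fun sub lt => if lt.1 == lang then sub.insert kv.1 lt.2 else sub) sub)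
          PySem.Dict.empty
      inv.insert lang sub) PySem.Dict.empty
  inv.items.map (fun p => (p.1, p.2.items))

-- ===== PRECONDITION & SPEC =====
def Spec_invert_translations (translations : List (String × List (String × String))) (out : List (String × List (String × String))) : Prop := out = invert_translations_alt translations
instance (translations : List (String × List (String × String))) (out : List (String × List (String × String))) : Decidable (Spec_invert_translations translations out) := by unfold Spec_invert_translations; infer_instance

-- ===== CLAIM (what is proved, stated in full; the proofs are below) =====
def Claim_equal_invert_translations : Prop := ∀ (translations : List (String × List (String × String))), Dom_invert_translations translations → Spec_invert_translations translations (invert_translations translations)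

-- ===== LEMMAS AND PROOFS =====

-- The (key, lang, text) triples of the input, in traversal order.
def pvTriples (translations : List (String × List (String × String))) : List (String × String × String) :=
  translations.flatMap (fun kv => kv.2.map (fun lt => (kv.1, lt.1, lt.2)))

-- A's loop body on one triple.
def pvStepA (inv : PySem.Dict String (PySem.Dict String String)) (p : String × String × String) :
    PySem.Dict String (PySem.Dict String String) :=
  let inv := if inv.contains p.2.1 then inv else inv.insert p.2.1 PySem.Dict.empty
  inv.modify p.2.1 PySem.Dict.empty (fun sub => sub.insert p.1 p.2.2)

-- B's sub-dict for one language, as a flat loop over the triples.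
def pvSubFor (L : List (String × String × String)) (g : String) : PySem.Dict String String :=
  L.foldl (fun sub p => if p.2.1 == g then sub.insert p.1 p.2.2 else sub) PySem.Dict.empty

-- Any nested loop over translations is the flat loop over the triples.
theorem pvFoldNested {σ : Type} (step : σ → String × String × String → σ)
    (ts : List (String × List (String × String))) (s0 : σ) :
    ts.foldl (fun s kv => kv.2.foldl (fun s lt => step s (kv.1, lt.1, lt.2)) s) s0
      = (pvTriples ts).foldl step s0 := by
  induction ts generalizing s0 with
  | nil => rfl
  | cons kv rest ih =>
      simp only [List.foldl_cons, pvTriples, List.flatMap_cons, List.foldl_append, List.foldl_map]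
      exact ih _

-- One A-step adds the language to the key set …
theorem pvKeysStep (d : PySem.Dict String (PySem.Dict String String)) (p : String × String × String) :
    (pvStepA d p).keys = PySem.Set.add d.keys p.2.1 := by
  unfold pvStepA
  by_cases h : d.contains p.2.1
  · simp only [h, if_true, PySem.Dict.keys_modify]
    rw [PySem.Dict.keys_insert_of_contains _ _ h,
        PySem.Set.add_of_mem ((PySem.Dict.contains_iff_mem_keys d p.2.1).mp h)]
  · have h' : d.contains p.2.1 = false := by simpa using h
    simp only [h', if_false, Bool.false_eq_true, PySem.Dict.keys_modify]
    rw [PySem.Dict.keys_insert_of_contains _ _ (PySem.Dict.contains_insert_self d p.2.1 _),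
        PySem.Dict.keys_insert_of_not_contains _ _ h',
        PySem.Set.add_of_not_mem (by
          intro hm; exact h ((PySem.Dict.contains_iff_mem_keys d p.2.1).mpr hm))]

-- … and updates exactly the sub-dict of that language.
theorem pvGetDStep (d : PySem.Dict String (PySem.Dict String String)) (p : String × String × String) (g : String) :
    (pvStepA d p).getD g PySem.Dict.empty
      = if p.2.1 == g then (d.getD g PySem.Dict.empty).insert p.1 p.2.2 else d.getD g PySem.Dict.empty := by
  unfold pvStepA
  by_cases hg : p.2.1 = g
  · subst hg
    simp only [beq_self_eq_true, if_true]
    by_cases h : d.contains p.2.1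
    · simp only [h, if_true, PySem.Dict.getD_modify_self]
    · have h' : d.contains p.2.1 = false := by simpa using h
      simp only [h', Bool.false_eq_true, if_false, PySem.Dict.getD_modify_self,
        PySem.Dict.getD_insert_self, PySem.Dict.getD_of_not_contains d _ h']
  · have hbe : (p.2.1 == g) = false := by simp [hg]
    have hg' : g ≠ p.2.1 := fun h => hg h.symm
    simp only [hbe, Bool.false_eq_true, if_false]
    by_cases h : d.contains p.2.1
    · simp only [h, if_true, PySem.Dict.getD_modify_of_ne _ _ _ hg']
    · have h' : d.contains p.2.1 = false := by simpa using h
      simp only [h', Bool.false_eq_true, if_false, PySem.Dict.getD_modify_of_ne _ _ _ hg',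
        PySem.Dict.getD_insert_of_ne _ _ _ hg']

theorem pvKeysA (L : List (String × String × String)) (d : PySem.Dict String (PySem.Dict String String)) :
    (L.foldl pvStepA d).keys = PySem.Set.update d.keys (L.map (·.2.1)) := by
  induction L generalizing d with
  | nil => rw [List.foldl_nil, List.map_nil, PySem.Set.update_nil]
  | cons p L ih =>
      rw [List.foldl_cons, ih, List.map_cons, PySem.Set.update_cons, pvKeysStep]

theorem pvGetDA (L : List (String × String × String)) (d : PySem.Dict String (PySem.Dict String String)) (g : String) :
    (L.foldl pvStepA d).getD g PySem.Dict.empty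
      = L.foldl (fun sub p => if p.2.1 == g then sub.insert p.1 p.2.2 else sub) (d.getD g PySem.Dict.empty) := by
  induction L generalizing d with
  | nil => rfl
  | cons p L ih => rw [List.foldl_cons, ih, List.foldl_cons, pvGetDStep]

-- A's accumulated dict, described as B computes it.
theorem pvItemsA (ts : List (String × List (String × String))) :
    ((pvTriples ts).foldl pvStepA PySem.Dict.empty).items
      = (PySem.Set.ofList ((pvTriples ts).map (·.2.1))).map
          (fun g => (g, pvSubFor (pvTriples ts) g)) := by
  have hkeys : ((pvTriples ts).foldl pvStepA PySem.Dict.empty).keys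
      = PySem.Set.ofList ((pvTriples ts).map (·.2.1)) := by
    rw [pvKeysA, PySem.Dict.keys_empty,
        show ([] : PySem.Set String) = PySem.Set.empty from rfl, PySem.Set.update_empty]
  rw [PySem.Dict.items_eq_map_keys _ (by rw [hkeys]; exact PySem.Set.nodup_ofList _) PySem.Dict.empty,
      hkeys]
  refine List.map_congr_left (fun g _ => ?_)
  rw [pvGetDA, PySem.Dict.getD_empty]
  rfl

-- ===== VERDICT (by name: the statement is the Claim_ definition above) =====
theorem invert_translations_spec : Claim_equal_invert_translations := by
  intro ts _
  show invert_translations ts = invert_translations_alt ts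
  have hA : invert_translations ts
      = ((pvTriples ts).foldl pvStepA PySem.Dict.empty).items.map (fun p => (p.1, p.2.items)) :=
    congrArg (fun d => d.items.map (fun p => (p.1, p.2.items))) (pvFoldNested pvStepA ts PySem.Dict.empty)
  have hlangs : (ts.foldl (fun s kv => kv.2.foldl (fun s lt => PySem.Set.add s lt.1) s) []
      : PySem.Set String) = PySem.Set.ofList ((pvTriples ts).map (·.2.1)) := by
    rw [pvFoldNested (fun (s : PySem.Set String) p => PySem.Set.add s p.2.1) ts [],
        ← PySem.Set.update_map_eq_foldl_add,
        show ([] : PySem.Set String) = PySem.Set.empty from rfl, PySem.Set.update_empty]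
  have hB : invert_translations_alt ts
      = ((PySem.Set.ofList ((pvTriples ts).map (·.2.1))).foldl
          (fun inv lang =>
            inv.insert lang (ts.foldl (fun sub kv =>
              kv.2.foldl (fun sub lt => if lt.1 == lang then sub.insert kv.1 lt.2 else sub) sub)
              PySem.Dict.empty)) PySem.Dict.empty).items.map (fun p => (p.1, p.2.items)) := by
    have := congrArg (fun (l : PySem.Set String) =>
      ((l.foldl (fun (inv : PySem.Dict String (PySem.Dict String String)) (lang : String) =>
          inv.insert lang (ts.foldl (fun sub kv =>
            kv.2.foldl (fun sub lt => if lt.1 == lang then sub.insert kv.1 lt.2 else sub) sub)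
            PySem.Dict.empty)) PySem.Dict.empty).items.map
        (fun (p : String × PySem.Dict String String) => (p.1, p.2.items)))) hlangs
    exact this
  have hfun : (fun (inv : PySem.Dict String (PySem.Dict String String)) lang =>
        inv.insert lang (ts.foldl (fun sub kv =>
          kv.2.foldl (fun sub lt => if lt.1 == lang then sub.insert kv.1 lt.2 else sub) sub)
          PySem.Dict.empty))
      = (fun inv lang => inv.insert lang (pvSubFor (pvTriples ts) lang)) := by
    funext inv lang
    exact congrArg (inv.insert lang) (pvFoldNested
      (fun (sub : PySem.Dict String String) p => if p.2.1 == lang then sub.insert p.1 p.2.2 else sub)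
      ts PySem.Dict.empty)
  rw [hfun] at hB
  have hfresh : ((PySem.Set.ofList ((pvTriples ts).map (·.2.1))).foldl
      (fun inv lang => inv.insert lang (pvSubFor (pvTriples ts) lang)) PySem.Dict.empty).items
      = (PySem.Set.ofList ((pvTriples ts).map (·.2.1))).map
          (fun g => (g, pvSubFor (pvTriples ts) g)) := by
    simpa using PySem.Dict.items_foldl_insert_fresh
      (PySem.Set.ofList ((pvTriples ts).map (·.2.1))) (fun a => a)
      (fun g => pvSubFor (pvTriples ts) g) PySem.Dict.empty
      (fun a _ => PySem.Dict.contains_empty a)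
      (by rw [List.map_id']; exact PySem.Set.nodup_ofList ((pvTriples ts).map (·.2.1)))
  rw [hA, hB, hfresh, pvItemsA]
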